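-- pv_equiv track=rewrite | github.com/JulleK/Web_Development | exercises/project_euler/54.pokerHand/54.pokerHand.py | checkPairs
-- ===== SOURCE A (Python) =====
-- def checkPairs(hand, excludedCard=False):
--     pairs = []
--     for i in hand:
--         for j in hand:
--             if i == j:
--                 continue
--             if i[0] == excludedCard:
--                 continue
--             elif i[0] == j[0]:
--                 pairs.append(i[0])
--
--     pairs = set(pairs)
--     return pairs
-- ===== SOURCE B (Python) =====
-- def checkPairs(hand, excludedCard=False):
--     groups = {}
--     for card in hand:
--         cards = groups.setdefault(card[0], [])
--         if card not in cards:
--             cards.append(card)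
--     return {v for v, cards in groups.items() if len(cards) >= 2 and v != excludedCard}
-- ===== Notes on version B (the rewrite author's own statement) =====
-- stated objective: faster
-- what changed: Replaces A's nested double scan over the hand with a single grouping pass building a dict from card value to its distinct cards, then filters the table for values carried by at least two distinct cards and not equal to excludedCard.
-- outside the precondition, e.g. on checkPairs(['', ''], None): A returns set(), B raises IndexError
import Mathlib
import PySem

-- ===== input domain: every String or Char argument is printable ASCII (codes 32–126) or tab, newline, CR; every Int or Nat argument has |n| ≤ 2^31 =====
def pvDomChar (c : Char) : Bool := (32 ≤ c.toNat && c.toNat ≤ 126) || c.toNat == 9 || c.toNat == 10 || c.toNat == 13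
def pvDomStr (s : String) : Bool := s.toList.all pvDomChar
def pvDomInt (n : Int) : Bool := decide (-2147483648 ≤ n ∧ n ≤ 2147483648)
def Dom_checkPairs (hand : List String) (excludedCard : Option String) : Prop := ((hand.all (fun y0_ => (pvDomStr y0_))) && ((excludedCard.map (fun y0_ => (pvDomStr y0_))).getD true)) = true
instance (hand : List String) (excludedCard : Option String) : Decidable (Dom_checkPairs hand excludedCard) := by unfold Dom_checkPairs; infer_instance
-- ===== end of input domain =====

-- B replaces A's nested double scan with one grouping pass (value -> distinct cards) plus a filter over the table.
-- Both ports model Python's card[0] (a 1-character string) by pvHead; Pre_ excludes hands containing "" (card[0] raises).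

-- shared helper: Python's card[0] as a 1-character string ("" never occurs inside Pre_)
def pvHead (s : String) : String :=
  match PySem.Str.pyGet? s 0 with
  | some c => String.ofList [c]
  | none => ""

-- ===== PORT A =====
def checkPairs (hand : List String) (excludedCard : Option String) : List String :=
  let pairs : List String := hand.foldl (fun acc i =>
    hand.foldl (fun acc j =>
      if i = j then acc
      else if some (pvHead i) = excludedCard then acc
      else if pvHead i = pvHead j then acc ++ [pvHead i]
      else acc) acc) []
  PySem.Set.ofList pairs

-- ===== PORT B =====
def pvGroups (hand : List String) : PySem.Dict String (List String) :=
  hand.foldl (fun g card =>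
    let cur := g.getD (pvHead card) []
    g.insert (pvHead card) (if card ∈ cur then cur else cur ++ [card])) PySem.Dict.empty

def checkPairs_alt (hand : List String) (excludedCard : Option String) : List String :=
  PySem.Set.ofList ((((pvGroups hand).items.filter
    (fun p => decide (2 ≤ p.2.length) && decide (some p.1 ≠ excludedCard))).map Prod.fst))

-- ===== PRECONDITION & SPEC =====
-- Pre_ excludes hands containing the empty string, on which card[0] raises IndexError in Python
-- (except in the degenerate hand made only of copies of "", where A happens to return set() but B still raises).
def Pre_checkPairs (hand : List String) (excludedCard : Option String) : Prop := "" ∉ hand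
instance (hand : List String) (excludedCard : Option String) : Decidable (Pre_checkPairs hand excludedCard) := by unfold Pre_checkPairs; infer_instance
def pvWitness_checkPairs : List String × Option String := (["5H", "5D", "9C"], some "9")

def Spec_checkPairs (hand : List String) (excludedCard : Option String) (out : List String) : Prop := out = checkPairs_alt hand excludedCard
instance (hand : List String) (excludedCard : Option String) (out : List String) : Decidable (Spec_checkPairs hand excludedCard out) := by unfold Spec_checkPairs; infer_instance

-- ===== CLAIM (what is proved, stated in full; the proofs are below) =====
def Claim_equal_checkPairs : Prop := ∀ (hand : List String) (excludedCard : Option String), Dom_checkPairs hand excludedCard → Pre_checkPairs hand excludedCard → Spec_checkPairs hand excludedCard (checkPairs hand excludedCard)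

-- ===== LEMMAS AND PROOFS =====

-- the distinct cards of `hand` whose value is `v`, in first-occurrence order
def pvGrp (hand : List String) (v : String) : List String :=
  PySem.Set.ofList (hand.filter (fun c => pvHead c = v))

-- the distinct card values of `hand`, in first-occurrence order
def pvHeads (hand : List String) : List String := PySem.Set.ofList (hand.map pvHead)

-- "value v contributes to the result": at least two distinct cards carry it and it is not excluded
def pvQ (hand : List String) (exc : Option String) (v : String) : Bool :=
  decide (2 ≤ (pvGrp hand v).length) && decide (some v ≠ exc)

lemma pvGrp_append (hand : List String) (x v : String) :
    pvGrp (hand ++ [x]) v =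
      if pvHead x = v then PySem.Set.add (pvGrp hand v) x else pvGrp hand v := by
  unfold pvGrp
  rw [List.filter_append]
  by_cases h : pvHead x = v
  · simp [h, PySem.Set.ofList_append_singleton]
  · simp [h]

lemma nodup_pvHeads (hand : List String) : (pvHeads hand).Nodup :=
  PySem.Set.nodup_ofList (hand.map pvHead)

lemma mem_pvHeads {hand : List String} {v : String} : v ∈ pvHeads hand ↔ ∃ c ∈ hand, pvHead c = v := by
  simp [pvHeads, PySem.Set.mem_ofList]

lemma pvGroups_items (hand : List String) :
    (pvGroups hand).items = (pvHeads hand).map (fun v => (v, pvGrp hand v)) := by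
  induction hand using List.reverseRecOn with
  | nil => rfl
  | append_singleton xs x ih =>
    have hkeys : (pvGroups xs).keys = pvHeads xs := by
      simp only [PySem.Dict.keys, ih, List.map_map]
      exact List.map_id _
    have hnd : (pvGroups xs).keys.Nodup := by rw [hkeys]; exact nodup_pvHeads xs
    have hfold : pvGroups (xs ++ [x]) =
        (pvGroups xs).insert (pvHead x)
          (let cur := (pvGroups xs).getD (pvHead x) []
           if x ∈ cur then cur else cur ++ [x]) := by
      unfold pvGroups; rw [List.foldl_append]; rfl
    have hheads : pvHeads (xs ++ [x]) = PySem.Set.add (pvHeads xs) (pvHead x) := by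
      unfold pvHeads; rw [List.map_append]; exact PySem.Set.ofList_append_singleton _ _
    by_cases hc : pvHead x ∈ pvHeads xs
    · -- existing key
      have hget : (pvGroups xs).getD (pvHead x) [] = pvGrp xs (pvHead x) := by
        apply PySem.Dict.getD_of_mem_items _ _ hnd
        rw [ih]; exact List.mem_map_of_mem (by exact hc)
      have hcontains : (pvGroups xs).contains (pvHead x) = true := by
        rw [PySem.Dict.contains_iff_mem_keys, hkeys]; exact hc
      rw [hfold]
      simp only [hget]
      rw [PySem.Dict.items_insert_of_contains _ _ hcontains, ih, List.map_map,
        hheads, PySem.Set.add_of_mem hc]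
      apply List.map_congr_left
      intro v hv
      by_cases hvx : v = pvHead x
      · subst hvx
        rw [pvGrp_append, if_pos rfl, PySem.Set.add_eq_ite]
        simp
      · have hb : (v == pvHead x) = false := by simp [hvx]
        rw [pvGrp_append, if_neg (fun h => hvx (Eq.symm h))]
        simp [hvx]
    · -- fresh key
      have hcontains : (pvGroups xs).contains (pvHead x) = false := by
        rw [← Bool.not_eq_true, PySem.Dict.contains_iff_mem_keys, hkeys]; exact hc
      have hget : (pvGroups xs).getD (pvHead x) [] = [] :=
        PySem.Dict.getD_of_not_contains _ _ hcontains
      have hgrp_nil : pvGrp xs (pvHead x) = [] := by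
        unfold pvGrp
        have : xs.filter (fun c => pvHead c = pvHead x) = [] := by
          rw [List.filter_eq_nil_iff]
          intro c hcmem hdec
          exact hc (mem_pvHeads.mpr ⟨c, hcmem, by simpa using hdec⟩)
        rw [this]; rfl
      rw [hfold]
      simp only [hget, List.not_mem_nil, if_false, List.nil_append]
      rw [PySem.Dict.items_insert_of_not_contains _ _ hcontains, ih,
        hheads, PySem.Set.add_of_not_mem hc, List.map_append]
      congr 1
      · apply List.map_congr_left
        intro v hv
        have hvx : pvHead x ≠ v := fun h => hc (h ▸ hv)
        rw [pvGrp_append, if_neg hvx]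
      · simp only [List.map_cons, List.map_nil]
        rw [pvGrp_append, if_pos rfl, hgrp_nil]
        rfl

lemma checkPairs_alt_eq (hand : List String) (exc : Option String) :
    checkPairs_alt hand exc = (pvHeads hand).filter (pvQ hand exc) := by
  unfold checkPairs_alt
  rw [pvGroups_items, List.filter_map, List.map_map]
  have h1 : ((pvHeads hand).filter
      ((fun p : String × List String => decide (2 ≤ p.2.length) && decide (some p.1 ≠ exc)) ∘
        (fun v => (v, pvGrp hand v)))) = (pvHeads hand).filter (pvQ hand exc) := by
    apply List.filter_congr
    intro v _
    rfl
  rw [h1]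
  have h2 : (Prod.fst ∘ fun v => (v, pvGrp hand v)) = id := rfl
  rw [h2, List.map_id]
  exact PySem.Set.ofList_eq_self_of_nodup _ ((nodup_pvHeads hand).filter _)

lemma checkPairs_eq_flatMap (hand : List String) (exc : Option String) :
    checkPairs hand exc = PySem.Set.ofList (hand.flatMap (fun i =>
      (hand.filter (fun j => decide (i ≠ j) && decide (some (pvHead i) ≠ exc)
        && decide (pvHead i = pvHead j))).map (fun _ => pvHead i))) := by
  have hinner : ∀ (i : String) (acc : List String),
      hand.foldl (fun acc j =>
        if i = j then acc
        else if some (pvHead i) = exc then acc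
        else if pvHead i = pvHead j then acc ++ [pvHead i]
        else acc) acc
      = acc ++ (hand.filter (fun j => decide (i ≠ j) && decide (some (pvHead i) ≠ exc)
          && decide (pvHead i = pvHead j))).map (fun _ => pvHead i) := by
    intro i acc
    rw [← PySem.List.foldl_append_if
      (fun j => decide (i ≠ j) && decide (some (pvHead i) ≠ exc) && decide (pvHead i = pvHead j))
      (fun _ => pvHead i) hand acc]
    apply PySem.List.foldl_congr_mem
    intro a j _
    by_cases h1 : i = j <;> by_cases h2 : some (pvHead i) = exc <;>
      by_cases h3 : pvHead i = pvHead j <;> simp [h1, h2, h3]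
  have hpairs : hand.foldl (fun acc i =>
      hand.foldl (fun acc j =>
        if i = j then acc
        else if some (pvHead i) = exc then acc
        else if pvHead i = pvHead j then acc ++ [pvHead i]
        else acc) acc) []
      = hand.flatMap (fun i =>
        (hand.filter (fun j => decide (i ≠ j) && decide (some (pvHead i) ≠ exc)
          && decide (pvHead i = pvHead j))).map (fun _ => pvHead i)) := by
    rw [PySem.List.foldl_congr_mem hand _ _ [] (fun acc i _ => hinner i acc)]
    rw [PySem.List.foldl_append_eq_flatMap]
    rfl
  simp only [checkPairs]
  rw [hpairs]

lemma two_le_pvGrp_iff {hand : List String} {i : String} (hi : i ∈ hand) :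
    2 ≤ (pvGrp hand (pvHead i)).length ↔ ∃ j ∈ hand, j ≠ i ∧ pvHead j = pvHead i := by
  have hnd : (pvGrp hand (pvHead i)).Nodup := PySem.Set.nodup_ofList _
  have hmem : i ∈ pvGrp hand (pvHead i) := by
    unfold pvGrp
    rw [PySem.Set.mem_ofList, List.mem_filter]
    exact ⟨hi, by simp⟩
  constructor
  · intro hlen
    by_contra hno
    push_neg at hno
    have hsub : pvGrp hand (pvHead i) ⊆ [i] := by
      intro x hx
      unfold pvGrp at hx
      rw [PySem.Set.mem_ofList, List.mem_filter] at hx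
      obtain ⟨hx1, hx2⟩ := hx
      by_contra hxi
      simp at hxi
      exact hno x hx1 hxi (by simpa using hx2)
    have := (List.subperm_of_subset hnd hsub).length_le
    simp at this
    omega
  · rintro ⟨j, hj, hji, hjh⟩
    have hjmem : j ∈ pvGrp hand (pvHead i) := by
      unfold pvGrp
      rw [PySem.Set.mem_ofList, List.mem_filter]
      exact ⟨hj, by simp [hjh]⟩
    have hsub : [j, i] ⊆ pvGrp hand (pvHead i) := by
      intro x hx
      simp at hx
      rcases hx with h | h <;> subst h <;> assumption
    have := (List.subperm_of_subset (by simp [hji]) hsub).length_le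
    simpa using this

lemma discard_filter_comm {Q : String → Bool} (s : List String) (v : String) :
    PySem.Set.discard (s.filter Q) v = (PySem.Set.discard s v).filter Q := by
  simp [PySem.Set.discard, List.filter_filter, Bool.and_comm]

lemma filter_discard_of_neg {Q : String → Bool} (s : List String) (v : String) (hv : Q v = false) :
    (PySem.Set.discard s v).filter Q = s.filter Q := by
  simp only [PySem.Set.discard, List.filter_filter]
  apply List.filter_congr
  intro x _
  by_cases hx : x = v
  · subst hx; simp [hv]
  · simp [hx]

lemma ofList_const_append {v : String} {xs : List String} (ys : List String)
    (hne : xs ≠ []) (hall : ∀ x ∈ xs, x = v) :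
    PySem.Set.ofList (xs ++ ys) = v :: PySem.Set.discard (PySem.Set.ofList ys) v := by
  induction xs with
  | nil => exact absurd rfl hne
  | cons x xs ih =>
    have hx : x = v := hall x (by simp)
    subst hx
    rw [List.cons_append, PySem.Set.ofList_cons]
    rcases Decidable.em (xs = []) with h | h
    · subst h; simp
    · rw [ih h (fun y hy => hall y (by simp [hy]))]
      simp [PySem.Set.discard, List.filter_filter]

lemma ofList_flatMap_eq_filter (l : List String) (g : String → List String)
    (h : String → String) (Q : String → Bool)
    (hyp : ∀ i ∈ l, (∀ x ∈ g i, x = h i) ∧ (g i = [] ↔ Q (h i) = false)) :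
    PySem.Set.ofList (l.flatMap g) = (PySem.Set.ofList (l.map h)).filter Q := by
  induction l with
  | nil => rfl
  | cons i l ih =>
    obtain ⟨hall, hempty⟩ := hyp i (by simp)
    have ih' := ih (fun j hj => hyp j (by simp [hj]))
    rw [List.flatMap_cons, List.map_cons, PySem.Set.ofList_cons]
    by_cases hQ : Q (h i) = false
    · rw [hempty.mpr hQ, List.nil_append, ih', List.filter_cons_of_neg (by simp [hQ])]
      exact (filter_discard_of_neg _ _ hQ).symm
    · have hQt : Q (h i) = true := by revert hQ; cases Q (h i) <;> simp
      have hne : g i ≠ [] := fun he => by simp [hempty.mp he] at hQt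
      rw [ofList_const_append _ hne hall, ih', List.filter_cons_of_pos hQt]
      rw [discard_filter_comm]

lemma checkPairs_eq_alt (hand : List String) (exc : Option String) :
    checkPairs hand exc = checkPairs_alt hand exc := by
  rw [checkPairs_eq_flatMap, checkPairs_alt_eq]
  apply ofList_flatMap_eq_filter hand _ pvHead (pvQ hand exc)
  intro i hi
  constructor
  · intro x hx
    simp at hx
    exact hx.2
  · rw [List.map_eq_nil_iff, List.filter_eq_nil_iff]
    unfold pvQ
    constructor
    · intro hno
      rw [Bool.and_eq_false_iff]
      by_cases hexc : some (pvHead i) = exc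
      · right; simpa using hexc
      · left
        simp only [decide_eq_false_iff_not, not_le]
        by_contra hlen
        push_neg at hlen
        obtain ⟨j, hj, hji, hjh⟩ := (two_le_pvGrp_iff hi).mp (by omega)
        refine hno j hj ?_
        simp only [Bool.and_eq_true, decide_eq_true_eq]
        exact ⟨⟨fun he => hji he.symm, fun he => hexc he⟩, hjh.symm⟩
    · intro hQ j hj hdec
      simp only [Bool.and_eq_true, decide_eq_true_eq] at hdec
      obtain ⟨⟨hne, hexc⟩, hhd⟩ := hdec
      rw [Bool.and_eq_false_iff] at hQ
      rcases hQ with h | h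
      · simp only [decide_eq_false_iff_not, not_le] at h
        have := (two_le_pvGrp_iff hi).mpr ⟨j, hj, fun he => hne he.symm, hhd.symm⟩
        omega
      · simp at h
        exact hexc h

-- ===== VERDICT (by name: the statement is the Claim_ definition above) =====
theorem checkPairs_spec : Claim_equal_checkPairs := by
  intro hand excludedCard _ _
  unfold Spec_checkPairs
  exact checkPairs_eq_alt hand excludedCard
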